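-- pv_equiv track=rewrite | github.com/HyeonTee/Solved | 프로그래머스/lv1/82612. 부족한 금액 계산하기/부족한 금액 계산하기.py | solution
-- ===== SOURCE A (Python) =====
-- def solution(price, money, count):
--     price_sum = 0
--     for i in range(count+1):
--         price_sum += i * price
--     if price_sum > money:
--         answer = price_sum - money
--     else: answer = 0
--
--     return answer
-- ===== SOURCE B (Python) =====
-- def solution(price, money, count):
--     n = count if count > 0 else 0
--     total = price * n * (n + 1) // 2
--     return max(total - money, 0)
-- ===== Notes on version B (the rewrite author's own statement) =====
-- stated objective: faster
-- what changed: Replaced the O(count) accumulation loop by the closed-form Gauss sum price*count*(count+1)//2 and an explicit max for the shortfall.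
import Mathlib
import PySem

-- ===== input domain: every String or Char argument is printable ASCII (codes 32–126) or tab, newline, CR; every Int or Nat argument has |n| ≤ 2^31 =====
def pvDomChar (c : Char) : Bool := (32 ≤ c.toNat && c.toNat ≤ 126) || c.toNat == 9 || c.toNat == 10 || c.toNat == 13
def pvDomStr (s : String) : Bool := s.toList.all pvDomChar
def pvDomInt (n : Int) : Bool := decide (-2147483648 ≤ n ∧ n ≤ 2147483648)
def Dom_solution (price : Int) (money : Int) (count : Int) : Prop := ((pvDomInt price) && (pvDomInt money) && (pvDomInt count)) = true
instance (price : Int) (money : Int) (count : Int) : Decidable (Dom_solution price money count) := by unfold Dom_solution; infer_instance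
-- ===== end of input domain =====

-- B replaces A's O(count) accumulation loop by the closed-form Gauss sum (O(1)).

-- ===== PORT A =====
def solution (price : Int) (money : Int) (count : Int) : Int :=
  let price_sum := (PySem.List.pyRange 0 (count + 1) 1).foldl (fun acc i => acc + i * price) 0
  if price_sum > money then price_sum - money else 0

-- ===== PORT B =====
def solution_alt (price : Int) (money : Int) (count : Int) : Int :=
  let n := if count > 0 then count else 0
  let total := PySem.Int.floordiv (price * n * (n + 1)) 2
  max (total - money) 0

-- ===== PRECONDITION & SPEC =====
def Spec_solution (price : Int) (money : Int) (count : Int) (out : Int) : Prop := out = solution_alt price money count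
instance (price : Int) (money : Int) (count : Int) (out : Int) : Decidable (Spec_solution price money count out) := by unfold Spec_solution; infer_instance

-- ===== CLAIM (what is proved, stated in full; the proofs are below) =====
def Claim_equal_solution : Prop := ∀ (price : Int) (money : Int) (count : Int), Dom_solution price money count → Spec_solution price money count (solution price money count)

-- ===== LEMMAS AND PROOFS =====

/-- The loop over `range(m)` accumulates `init + price * (sum of 0..m-1)`,
    stated with the sum doubled to avoid division. -/
theorem pvSum_loop (price : Int) (m : Nat) (init : Int) :
    2 * ((PySem.List.pyRange 0 (m : Int) 1).foldl (fun acc i => acc + i * price) init)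
      = 2 * init + price * ((m : Int) * ((m : Int) - 1)) := by
  induction m generalizing init with
  | zero => simp [PySem.List.pyRange_one_eq_nil]
  | succ k ih =>
    have h : (0 : Int) ≤ (k : Int) := by positivity
    have hr := PySem.List.pyRange_one_succ_right (a := 0) (b := (k : Int)) h
    have : ((k + 1 : Nat) : Int) = (k : Int) + 1 := by push_cast; ring
    rw [this, hr, List.foldl_append]
    simp only [List.foldl_cons, List.foldl_nil]
    rw [mul_add, ih init]
    ring

theorem solution_spec : Claim_equal_solution := by
  intro price money count _
  unfold Spec_solution solution solution_alt
  by_cases hc : 0 ≤ count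
  · have hm : ((count.toNat + 1 : Nat) : Int) = count + 1 := by omega
    have hsum := pvSum_loop price (count.toNat + 1) 0
    rw [hm] at hsum
    have h2 : 2 * ((PySem.List.pyRange 0 (count + 1) 1).foldl (fun acc i => acc + i * price) 0)
        = price * ((count + 1) * count) := by rw [hsum]; ring_nf
    set s := (PySem.List.pyRange 0 (count + 1) 1).foldl (fun acc i => acc + i * price) 0
    have hn : (if count > 0 then count else 0) = count := by split_ifs <;> omega
    have htot : PySem.Int.floordiv (price * (if count > 0 then count else 0) *
        ((if count > 0 then count else 0) + 1)) 2 = s := by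
      rw [hn]
      have : price * count * (count + 1) = 2 * s := by rw [h2]; ring
      rw [this]
      simp [PySem.Int.floordiv, Int.mul_fdiv_cancel_left _ (by norm_num : (2:Int) ≠ 0)]
    simp only [htot]
    split_ifs with h <;> omega
  · have hnil : PySem.List.pyRange 0 (count + 1) 1 = [] :=
      PySem.List.pyRange_one_eq_nil (by omega)
    have hn0 : (if count > 0 then count else 0) = 0 := by split_ifs <;> omega
    rw [hnil]
    simp only [List.foldl_nil, hn0, mul_zero, zero_mul, PySem.Int.floordiv, Int.zero_fdiv]
    split_ifs with h <;> omega

-- ===== VERDICT (by name: the statement is the Claim_ definition above) =====
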